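-- pv_equiv track=rewrite | github.com/SteveParrington/CurseBlocks | src/curseblocks.py | makeShape
-- ===== SOURCE A (Python) =====
-- def makeShape(textShape):
--     shapeGrid = []
--     rotates = True
--     count = 0
--     for i in textShape:
--         if len(i) < 3:
--             count += 1
--             if count == 1:
--                 if i[0] == '0':
--                     rotates = False
--             elif count == 2:
--                 if i[0].isdigit():
--                     y = int(i[0])
--             elif count == 3:
--                 if i[0].isdigit():
--                     x = int(i[0])
--         else:
--             shapeLine = []
--             for j in list(i):
--                 if j.isdigit():
--                     shapeLine.append(int(j))
--             shapeGrid.append(shapeLine)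
--     return shapeGrid, rotates, y, x
-- ===== SOURCE B (Python) =====
-- def makeShape(textShape):
--     # Recursive decomposition: recurse on the tail first, then cons the current
--     # line's contribution onto the result (grid rows and meta lines built back-to-front).
--     def go(lines):
--         if not lines:
--             return [], []
--         grid, meta = go(lines[1:])
--         line = lines[0]
--         if len(line) < 3:
--             return grid, [line] + meta
--         return [[int(c) for c in line if c.isdigit()]] + grid, meta
--
--     grid, meta = go(textShape)
--     rotates = meta[0][0] != '0'
--     return grid, rotates, int(meta[1][0]), int(meta[2][0])
-- ===== Notes on version B (the rewrite author's own statement) =====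
-- stated objective: alternative
-- what changed: A's single forward loop with a mutable short-line counter selecting rotate/y/x branches is replaced by a structural recursion that consumes the tail first and conses each line's contribution back-to-front, returning the grid and the ordered meta lines together, from which the flag and y/x are read by direct destructuring; Pre_ excludes exactly the inputs on which A raises (IndexError on an empty short line among the first three, or UnboundLocalError when fewer than three short lines exist or the 2nd/3rd does not start with a digit), where B raises too.
import Mathlib
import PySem

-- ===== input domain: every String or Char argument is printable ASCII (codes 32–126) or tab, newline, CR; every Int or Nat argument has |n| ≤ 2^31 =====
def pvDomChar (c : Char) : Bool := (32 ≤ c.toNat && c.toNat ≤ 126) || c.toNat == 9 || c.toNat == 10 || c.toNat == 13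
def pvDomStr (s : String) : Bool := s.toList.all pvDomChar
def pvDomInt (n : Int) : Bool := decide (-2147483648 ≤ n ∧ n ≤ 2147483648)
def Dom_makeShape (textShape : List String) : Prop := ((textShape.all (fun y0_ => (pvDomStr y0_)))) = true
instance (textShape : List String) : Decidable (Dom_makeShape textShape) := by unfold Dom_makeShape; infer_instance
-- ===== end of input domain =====

-- B replaces A's single forward loop with a mutable counter by a structural recursion that builds the grid and the meta-line list back-to-front and then destructures them; objective: alternative.


-- ===== PORT A =====
-- exact value of Python's int(c) for a single ASCII digit character; both ports apply it only under an isdigit guard / Pre_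
def digitVal (c : Char) : Int := (c.toNat : Int) - 48

-- the meta-line branch of A's loop body (count==1/2/3 chain); none = Python's IndexError on i[0]
def metaStep (st : Bool × Nat × Option Int × Option Int) (i : List Char) :
    Option (Bool × Nat × Option Int × Option Int) :=
  match st with
  | (r, c, y, x) =>
    let c' := c + 1
    if c' = 1 then
      match i with
      | [] => none
      | ch :: _ => some (if ch = '0' then false else r, c', y, x)
    else if c' = 2 then
      match i with
      | [] => none
      | ch :: _ => some (r, c', if PySem.Chars.isdigit ch then some (digitVal ch) else y, x)
    else if c' = 3 then
      match i with
      | [] => none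
      | ch :: _ => some (r, c', y, if PySem.Chars.isdigit ch then some (digitVal ch) else x)
    else some (r, c', y, x)

-- one iteration of A's loop over textShape
def stepA (st : List (List Int) × Bool × Nat × Option Int × Option Int) (i : List Char) :
    Option (List (List Int) × Bool × Nat × Option Int × Option Int) :=
  if i.length < 3 then (metaStep st.2 i).map (fun m => (st.1, m))
  else some (st.1 ++ [i.foldl (fun acc j => if PySem.Chars.isdigit j then acc ++ [digitVal j] else acc) []], st.2)

def makeShape (textShape : List String) : List (List Int) × Bool × Int × Int :=
  match (textShape.map String.toList).foldl (fun o i => o.bind (fun s => stepA s i))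
      (some ([], (true, 0, none, none))) with
  | some (g, r, _, some y, some x) => (g, r, y, x)
  | some (g, r, _, _, _) => (g, r, 0, 0)   -- Python raises UnboundLocalError here; excluded by Pre_
  | none => ([], true, 0, 0)               -- Python raises IndexError here; excluded by Pre_

-- ===== PORT B =====
-- the comprehension [int(c) for c in line if c.isdigit()]
def lineB (l : List Char) : List Int := (l.filter PySem.Chars.isdigit).map digitVal

-- B's helper go: recursion on the tail first, contributions consed on in front
def goB : List (List Char) → List (List Int) × List (List Char)
  | [] => ([], [])
  | l :: ls =>
    let p := goB ls
    if l.length < 3 then (p.1, l :: p.2) else (lineB l :: p.1, p.2)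

def makeShape_alt (textShape : List String) : List (List Int) × Bool × Int × Int :=
  let p := goB (textShape.map String.toList)
  (p.1,
   !(PySem.List.pyGetD (PySem.List.pyGetD p.2 0 []) 0 ' ' == '0'),
   -- int(meta[1][0]) / int(meta[2][0]); under Pre_ these are single ASCII digits, so digitVal is exact
   digitVal (PySem.List.pyGetD (PySem.List.pyGetD p.2 1 []) 0 ' '),
   digitVal (PySem.List.pyGetD (PySem.List.pyGetD p.2 2 []) 0 ' '))

-- ===== PRECONDITION & SPEC =====
def headDigit (l : List Char) : Bool :=
  match l with
  | [] => false
  | c :: _ => PySem.Chars.isdigit c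

-- Pre_ = exactly the inputs on which Python A returns: at least three lines of length < 3, the first of them
-- nonempty (else IndexError on i[0]) and the second and third starting with a digit (else y/x stay unbound
-- and the return raises UnboundLocalError).
def Pre_makeShape (textShape : List String) : Prop :=
  let metaL := (textShape.map String.toList).filter (fun l => l.length < 3)
  3 ≤ metaL.length ∧ metaL.getD 0 [] ≠ [] ∧ headDigit (metaL.getD 1 []) = true ∧ headDigit (metaL.getD 2 []) = true
instance (textShape : List String) : Decidable (Pre_makeShape textShape) := by
  unfold Pre_makeShape; infer_instance

def pvWitness_makeShape : List String := ["1", "2", "3", "010110"]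

def Spec_makeShape (textShape : List String) (out : List (List Int) × Bool × Int × Int) : Prop :=
  out = makeShape_alt textShape
instance (textShape : List String) (out : List (List Int) × Bool × Int × Int) :
    Decidable (Spec_makeShape textShape out) := by unfold Spec_makeShape; infer_instance

-- ===== CLAIM (what is proved, stated in full; the proofs are below) =====
def Claim_equal_makeShape : Prop := ∀ (textShape : List String), Dom_makeShape textShape →
  Pre_makeShape textShape → Spec_makeShape textShape (makeShape textShape)

-- ===== LEMMAS AND PROOFS =====
def innerLine (l : List Char) : List Int :=
  l.foldl (fun acc j => if PySem.Chars.isdigit j then acc ++ [digitVal j] else acc) []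

lemma goB_eq (ls : List (List Char)) :
    goB ls = ((ls.filter (fun l => ¬ l.length < 3)).map lineB, ls.filter (fun l => l.length < 3)) := by
  induction ls with
  | nil => rfl
  | cons l ls ih =>
    by_cases h : l.length < 3
    · simp [goB, ih, h]
    · have h' : 3 ≤ l.length := by omega
      simp [goB, ih, h, h', List.filter_cons]

lemma stepA_short (g : List (List Int)) (st : Bool × Nat × Option Int × Option Int)
    (l : List Char) (h : l.length < 3) :
    stepA (g, st) l = (metaStep st l).map (fun m => (g, m)) := by
  simp [stepA, h]

lemma stepA_long (g : List (List Int)) (st : Bool × Nat × Option Int × Option Int)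
    (l : List Char) (h : ¬ l.length < 3) :
    stepA (g, st) l = some (g ++ [innerLine l], st) := by
  simp [stepA, h, innerLine]

lemma foldA_none (ls : List (List Char)) :
    ls.foldl (fun o i => o.bind (fun s => stepA s i)) none = none := by
  induction ls with
  | nil => rfl
  | cons l ls ih => simpa using ih

lemma metaFold_none (ls : List (List Char)) :
    ls.foldl (fun o i => o.bind (fun s => metaStep s i)) none = none := by
  induction ls with
  | nil => rfl
  | cons l ls ih => simpa using ih

lemma foldA_split (ls : List (List Char)) (g : List (List Int))
    (st : Bool × Nat × Option Int × Option Int) :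
    ls.foldl (fun o i => o.bind (fun s => stepA s i)) (some (g, st))
      = ((ls.filter (fun l => l.length < 3)).foldl (fun o i => o.bind (fun s => metaStep s i)) (some st)).map
          (fun m => (g ++ (ls.filter (fun l => 3 ≤ l.length)).map innerLine, m)) := by
  induction ls generalizing g st with
  | nil => simp
  | cons l ls ih =>
    by_cases h : l.length < 3
    · have h' : ¬ (3 ≤ l.length) := by omega
      simp only [List.foldl_cons, List.filter_cons, h, h', decide_true, decide_false,
        Option.bind_some]
      rw [stepA_short g st l h]
      cases hm : metaStep st l with
      | none => simp [hm, metaFold_none, foldA_none]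
      | some st' => simp [hm, ih]
    · have h' : (3 ≤ l.length) := by omega
      simp only [List.foldl_cons, List.filter_cons, h, h', decide_true, decide_false,
        Option.bind_some]
      rw [stepA_long g st l h, ih]
      simp

lemma metaStep0 (r : Bool) (y x : Option Int) (c0 : Char) (t0 : List Char) :
    metaStep (r, 0, y, x) (c0 :: t0) = some (if c0 = '0' then false else r, 1, y, x) := by
  simp [metaStep]

lemma metaStep1 (r : Bool) (y x : Option Int) (c1 : Char) (t1 : List Char)
    (h : PySem.Chars.isdigit c1 = true) :
    metaStep (r, 1, y, x) (c1 :: t1) = some (r, 2, some (digitVal c1), x) := by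
  simp [metaStep, h]

lemma metaStep2 (r : Bool) (y x : Option Int) (c2 : Char) (t2 : List Char)
    (h : PySem.Chars.isdigit c2 = true) :
    metaStep (r, 2, y, x) (c2 :: t2) = some (r, 3, y, some (digitVal c2)) := by
  simp [metaStep, h]

lemma metaStep_ge3 (r : Bool) (c : Nat) (y x : Option Int) (l : List Char) (hc : 3 ≤ c) :
    metaStep (r, c, y, x) l = some (r, c + 1, y, x) := by
  have h1 : ¬ (c = 0) := by omega
  have h2 : ¬ (c = 1) := by omega
  have h3 : ¬ (c = 2) := by omega
  simp [metaStep, h1, h2, h3]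

lemma metaFold_done (rest : List (List Char)) (r : Bool) (c : Nat) (y x : Option Int) (hc : 3 ≤ c) :
    rest.foldl (fun o i => o.bind (fun s => metaStep s i)) (some (r, c, y, x))
      = some (r, c + rest.length, y, x) := by
  induction rest generalizing c with
  | nil => simp
  | cons l rest ih =>
    simp only [List.foldl_cons, Option.bind_some]
    rw [metaStep_ge3 r c y x l hc, ih (c + 1) (by omega)]
    simp [List.length_cons]; omega

lemma innerLine_eq_lineB (l : List Char) : innerLine l = lineB l := by
  simp [innerLine, lineB, PySem.List.foldl_append_if]

-- ===== VERDICT (by name: the statement is the Claim_ definition above) =====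
theorem makeShape_spec : Claim_equal_makeShape := by
  intro ts _ pre
  obtain ⟨hlen, h0, h1, h2⟩ := pre
  have hx : ∃ m0 m1 m2 rest,
      (ts.map String.toList).filter (fun l => l.length < 3) = m0 :: m1 :: m2 :: rest := by
    match h : (ts.map String.toList).filter (fun l => l.length < 3) with
    | [] => rw [h] at hlen; simp at hlen
    | [_] => rw [h] at hlen; simp at hlen
    | [_, _] => rw [h] at hlen; simp at hlen
    | a :: b :: c :: r => exact ⟨a, b, c, r, h⟩
  obtain ⟨m0, m1, m2, rest, hM⟩ := hx
  rw [hM] at h0 h1 h2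
  simp only [List.getD, List.getElem?_cons_zero, List.getElem?_cons_succ, Option.getD_some]
    at h0 h1 h2
  obtain ⟨c0, t0, rfl⟩ := List.exists_cons_of_ne_nil h0
  cases m1 with
  | nil => simp [headDigit] at h1
  | cons c1 t1 =>
  cases m2 with
  | nil => simp [headDigit] at h2
  | cons c2 t2 =>
  simp only [headDigit] at h1 h2
  unfold Spec_makeShape makeShape makeShape_alt
  rw [foldA_split (ts.map String.toList) [] (true, 0, none, none), hM,
    goB_eq (ts.map String.toList), hM]
  rw [List.foldl_cons, List.foldl_cons, List.foldl_cons]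
  simp only [Option.bind_some]
  rw [metaStep0 true none none c0 t0]
  simp only [Option.bind_some]
  rw [metaStep1 _ none none c1 t1 h1]
  simp only [Option.bind_some]
  rw [metaStep2 _ _ none c2 t2 h2, metaFold_done rest _ 3 _ _ (le_refl 3)]
  simp only [Option.map_some, List.nil_append]
  refine Prod.ext ?_ (Prod.ext ?_ (Prod.ext ?_ ?_))
  · have hfil := List.filter_congr (l := List.map String.toList ts)
      (p := fun l => decide (3 ≤ l.length)) (q := fun l => decide (¬ l.length < 3))
      (fun l _ => by simp)
    rw [hfil]
    exact List.map_congr_left (fun l _ => innerLine_eq_lineB l)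
  · simp only [PySem.List.pyGetD_zero_cons]
    cases hc : (c0 == '0') <;> simp_all
  · simp [pysem]
  · simp [pysem]
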